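-- pv_equiv track=rewrite | github.com/umass-ml4ed/mathGPT | pre_process_utils.py | fix_matrix
-- ===== SOURCE A (Python) =====
-- def fix_matrix(formula_text: str):
--     """
--     Convert matrix elements in the MathSum datasets to valid latex
--     """
--     final_text = formula_text
--     match_found = False
--     matrix_types = ["matrix", "pmatrix", "vmatrix", "Vmatrix", "bmatrix", "Bmatrix", "smallmatrix"]
--     for matrix_type in matrix_types:
--         pmat_start = formula_text.find(f"\\{matrix_type}")
--         if pmat_start >= 0:
--             # Find starting and ending brackets
--             bracket_lvl = 0
--             open_bracket_idx = formula_text.find("{", pmat_start)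
--             for idx in range(open_bracket_idx, len(formula_text)):
--                 if formula_text[idx] == "{":
--                     bracket_lvl += 1
--                 elif formula_text[idx] == "}":
--                     bracket_lvl -= 1
--                 if bracket_lvl == 0:
--                     break
--
--             # Replace with begin/end macros
--             final_text = formula_text[:pmat_start] +\
--                 f" \\begin{{{matrix_type}}} " +\
--                 formula_text[open_bracket_idx + 1 : idx] +\
--                 f" \\end{{{matrix_type}}} " +\
--                 formula_text[idx + 1:]
--             match_found = True
--             break
--
--     # Run check again in case there were multiple matrix elements
--     if match_found:
--         final_text = fix_matrix(final_text)
--     return final_text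
-- ===== SOURCE B (Python) =====
-- MATRIX_TYPES = ["matrix", "pmatrix", "vmatrix", "Vmatrix", "bmatrix", "Bmatrix", "smallmatrix"]
--
--
-- def _close_idx(text: str, open_idx: int) -> int:
--     """Index of the brace matching text[open_idx], jumping from brace to brace
--     with str.find instead of stepping over every character. If the brace is
--     never closed, stop at the final character."""
--     depth, i = 1, open_idx + 1
--     while depth > 0:
--         nxt_open = text.find("{", i)
--         nxt_close = text.find("}", i)
--         if nxt_open == -1 and nxt_close == -1:
--             return len(text) - 1
--         if nxt_close == -1 or (nxt_open != -1 and nxt_open < nxt_close):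
--             depth, i = depth + 1, nxt_open + 1
--         else:
--             depth, i = depth - 1, nxt_close + 1
--     return i - 1
--
--
-- def fix_matrix(formula_text: str):
--     """
--     Convert matrix elements in the MathSum datasets to valid latex
--     """
--     text = formula_text
--     while True:
--         starts = [(t, text.find("\\" + t)) for t in MATRIX_TYPES]
--         hit = next(((t, p) for (t, p) in starts if p >= 0), None)
--         if hit is None:
--             return text
--         matrix_type, pmat_start = hit
--         open_idx = text.find("{", pmat_start)
--         if open_idx < 0:
--             # nothing to rewrite: the macro has no argument braces
--             return text
--         close_idx = _close_idx(text, open_idx)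
--         text = (text[:pmat_start]
--                 + f" \\begin{{{matrix_type}}} "
--                 + text[open_idx + 1: close_idx]
--                 + f" \\end{{{matrix_type}}} "
--                 + text[close_idx + 1:])
-- ===== Notes on version B (the rewrite author's own statement) =====
-- stated objective: alternative
-- what changed: A's tail recursion on the rewritten string becomes an iterative while-loop, the per-pass type selection becomes a comprehension over all find positions, and the matching close brace is located by jumping from brace to brace with str.find instead of stepping a bracket counter over every character.
-- outside the precondition, e.g. on fix_matrix('\\matrix'): A does not finish within the time limit, B returns '\\matrix'
import Mathlib
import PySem

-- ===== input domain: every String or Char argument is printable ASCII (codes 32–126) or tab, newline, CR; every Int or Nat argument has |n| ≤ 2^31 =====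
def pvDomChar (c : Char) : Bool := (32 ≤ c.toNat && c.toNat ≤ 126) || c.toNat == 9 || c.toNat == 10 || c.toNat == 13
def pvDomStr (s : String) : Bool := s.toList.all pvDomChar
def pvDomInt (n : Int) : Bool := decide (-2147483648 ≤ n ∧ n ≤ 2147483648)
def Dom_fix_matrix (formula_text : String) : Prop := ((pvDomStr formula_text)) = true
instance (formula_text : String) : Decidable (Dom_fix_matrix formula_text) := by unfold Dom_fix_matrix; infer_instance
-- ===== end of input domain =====

-- B replaces A's tail recursion by an iterative rewrite loop whose brace matching jumps
-- from brace to brace with find instead of stepping over every character (objective: alternative).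

-- ===== PORT A =====
-- the matrix macro names, in A's fixed search order
def pvTypes : List (List Char) :=
  ["matrix".toList, "pmatrix".toList, "vmatrix".toList, "Vmatrix".toList,
   "bmatrix".toList, "Bmatrix".toList, "smallmatrix".toList]

def pvBegin (t : List Char) : List Char := " \\begin{".toList ++ t ++ "} ".toList
def pvEnd (t : List Char) : List Char := " \\end{".toList ++ t ++ "} ".toList

-- A's inner `for idx in range(open_bracket_idx, len(formula_text))` bracket-level scan;
-- `last` carries the loop variable's current value (Python's idx after the loop).
-- pyGet? is none only for an empty string, which this loop is never reached on.
def pvScanA (s : List Char) : Int → List Int → Int → Int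
  | _, [], last => last
  | lvl, i :: rest, _ =>
    let c := PySem.List.pyGet? s i
    let lvl' := if c = some '{' then lvl + 1 else if c = some '}' then lvl - 1 else lvl
    if lvl' = 0 then i else pvScanA s lvl' rest i

-- A's `for matrix_type in matrix_types` loop: first type found rewrites and breaks
def pvPassA (s : List Char) : List (List Char) → Option (List Char)
  | [] => none
  | t :: ts =>
    let p := PySem.Chars.find s ('\\' :: t)
    if 0 ≤ p then
      let o := PySem.Chars.findFrom s ['{'] p none
      let idx := pvScanA s 0 (PySem.List.pyRange o (s.length : Int) 1) ((s.length : Int) - 1)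
      some (PySem.List.slice s none (some p) ++ pvBegin t ++
            PySem.List.slice s (some (o + 1)) (some idx) ++ pvEnd t ++
            PySem.List.slice s (some (idx + 1)) none)
    else pvPassA s ts

-- A's self-recursion `final_text = fix_matrix(final_text)`; the fuel is a totality
-- guard only (each rewrite removes one macro occurrence, so length+1 passes suffice).
def pvLoopA : Nat → List Char → List Char
  | 0, s => s
  | n + 1, s =>
    match pvPassA s pvTypes with
    | none => s
    | some s' => pvLoopA n s'

def fix_matrix (formula_text : String) : String :=
  String.ofList (pvLoopA (formula_text.toList.length + 1) formula_text.toList)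

-- ===== PORT B =====
-- Source B's _close_idx: jump from brace to brace with find; fuel is a totality guard
-- only (the position strictly increases, so length+1 jumps suffice).
def pvCloseIdx (s : List Char) : Nat → Int → Int → Int
  | 0, _, i => i - 1
  | fuel + 1, depth, i =>
    if 0 < depth then
      let nOpen := PySem.Chars.findFrom s ['{'] i none
      let nClose := PySem.Chars.findFrom s ['}'] i none
      if nOpen = -1 ∧ nClose = -1 then (s.length : Int) - 1
      else if nClose = -1 ∨ (nOpen ≠ -1 ∧ nOpen < nClose) then
        pvCloseIdx s fuel (depth + 1) (nOpen + 1)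
      else pvCloseIdx s fuel (depth - 1) (nClose + 1)
    else i - 1

-- Source B's loop body: the comprehension of find positions, the first hit, one rewrite
def pvStepB (s : List Char) : Option (List Char) :=
  match (pvTypes.map (fun t => (t, PySem.Chars.find s ('\\' :: t)))).find?
      (fun x => decide (0 ≤ x.2)) with
  | none => none
  | some (t, p) =>
    let o := PySem.Chars.findFrom s ['{'] p none
    if o < 0 then none
    else
      let c := pvCloseIdx s (s.length + 1) 1 (o + 1)
      some (PySem.List.slice s none (some p) ++ pvBegin t ++
            PySem.List.slice s (some (o + 1)) (some c) ++ pvEnd t ++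
            PySem.List.slice s (some (c + 1)) none)

-- Source B's `while True` loop; fuel is a totality guard only
def pvLoopB : Nat → List Char → List Char
  | 0, s => s
  | n + 1, s =>
    match pvStepB s with
    | none => s
    | some s' => pvLoopB n s'

def fix_matrix_alt (formula_text : String) : String :=
  String.ofList (pvLoopB (formula_text.toList.length + 1) formula_text.toList)

-- ===== PRECONDITION & SPEC =====
-- Pre_ excludes inputs in which some matrix macro occurrence has no open brace anywhere
-- after it: there A either recurses forever or splices via Python's negative-index
-- wraparound (see the cited examples), while B simply stops and returns the text.
def Pre_fix_matrix (formula_text : String) : Prop :=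
  ∀ i < formula_text.toList.length, ∀ t ∈ pvTypes,
    ('\\' :: t) <+: formula_text.toList.drop i → '{' ∈ formula_text.toList.drop i
instance (formula_text : String) : Decidable (Pre_fix_matrix formula_text) := by
  unfold Pre_fix_matrix; infer_instance

def pvWitness_fix_matrix : String := "a + \\pmatrix{x & y} - b"

def Spec_fix_matrix (formula_text : String) (out : String) : Prop := out = fix_matrix_alt formula_text
instance (formula_text : String) (out : String) : Decidable (Spec_fix_matrix formula_text out) := by unfold Spec_fix_matrix; infer_instance

-- ===== CLAIM (what is proved, stated in full; the proofs are below) =====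
def Claim_equal_fix_matrix : Prop := ∀ (formula_text : String), Dom_fix_matrix formula_text → Pre_fix_matrix formula_text → Spec_fix_matrix formula_text (fix_matrix formula_text)

-- ===== LEMMAS AND PROOFS =====

-- the invariant carried through the rewrite passes: every macro occurrence has a '{' after it
def pvInv (s : List Char) : Prop :=
  ∀ i, ∀ t ∈ pvTypes, ('\\' :: t) <+: s.drop i → '{' ∈ s.drop i

lemma pvInv_of_pre (s : String) (h : Pre_fix_matrix s) : pvInv s.toList := by
  intro i t ht hp
  by_cases hi : i < s.toList.length
  · exact h i hi t ht hp
  · rw [List.drop_eq_nil_of_le (by omega)] at hp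
    exact absurd (List.eq_nil_of_prefix_nil hp) (by simp)


lemma pv_singleton_prefix_iff (l : List Char) (i : Nat) (c : Char) :
    ([c] <+: l.drop i) ↔ l[i]? = some c := by
  rw [List.cons_prefix_iff, ← List.head?_drop]
  constructor
  · rintro ⟨l', hl, -⟩; rw [hl]; rfl
  · intro h; rw [List.head?_eq_some_iff] at h; obtain ⟨t, ht⟩ := h; exact ⟨t, ht, List.nil_prefix⟩

lemma pv_getElem_mem_drop (l : List Char) (i j : Nat) (h : j < l.length) (hij : i ≤ j) :
    l[j] ∈ l.drop i := by
  have hx : (l.drop i)[j - i]'(by simp; omega) = l[j] := by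
    rw [List.getElem_drop]; congr 1; omega
  rw [← hx]; exact List.getElem_mem _

lemma pv_findFrom_eq_iff (s : List Char) (c : Char) (j k : Nat) (hj : j ≤ s.length)
    (hk : k < s.length) (hjk : j ≤ k) (hc : s[k]? = some c)
    (hmin : ∀ i, j ≤ i → i < k → s[i]? ≠ some c) :
    PySem.Chars.findFrom s [c] (j : Int) none = (k : Int) := by
  have hmem : c ∈ s.drop j := by
    have := pv_getElem_mem_drop s j k hk hjk
    rwa [(List.getElem?_eq_some_iff.mp hc).choose_spec] at this
  have hne : PySem.Chars.findFrom s [c] (j : Int) none ≠ -1 := by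
    intro h
    rw [PySem.Chars.findFrom_natCast_eq_neg_one_iff s [c] j hj, List.singleton_infix_iff] at h
    exact h hmem
  obtain ⟨hle, hpre, hminf⟩ := PySem.Chars.findFrom_natCast_spec s [c] j hj hne
  set r := PySem.Chars.findFrom s [c] (j : Int) none with hr
  have hr0 : 0 ≤ r := le_trans (by exact_mod_cast Nat.zero_le j) hle
  have hrc : s[r.toNat]? = some c := (pv_singleton_prefix_iff s r.toNat c).mp hpre
  have hjr : j ≤ r.toNat := by omega
  have h1 : ¬ r.toNat < k := fun hlt => hmin r.toNat hjr hlt hrc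
  have h2 : ¬ k < r.toNat := fun hlt =>
    hminf k hjk hlt ((pv_singleton_prefix_iff s k c).mpr hc)
  have : r.toNat = k := by omega
  omega

lemma pv_findFrom_self (s : List Char) (j : Nat) (c : Char) (hj : j < s.length)
    (hc : s[j]? = some c) : PySem.Chars.findFrom s [c] (j : Int) none = (j : Int) :=
  pv_findFrom_eq_iff s c j j (by omega) hj le_rfl hc (by omega)

lemma pv_findFrom_neg_iff (s : List Char) (j : Nat) (c : Char) (hj : j ≤ s.length) :
    PySem.Chars.findFrom s [c] (j : Int) none = -1 ↔ c ∉ s.drop j := by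
  rw [PySem.Chars.findFrom_natCast_eq_neg_one_iff s [c] j hj, List.singleton_infix_iff]

lemma pv_findFrom_succ_of_ne (s : List Char) (j : Nat) (c : Char) (hj : j < s.length)
    (hc : s[j]? ≠ some c) :
    PySem.Chars.findFrom s [c] (j : Int) none = PySem.Chars.findFrom s [c] ((j : Int) + 1) none := by
  have hdrop : s.drop j = s[j] :: s.drop (j + 1) := by
    rw [List.drop_eq_getElem_cons hj]
  by_cases hmem : c ∈ s.drop (j + 1)
  · obtain ⟨k, hk, hck⟩ := List.getElem_of_mem hmem
    have hklen : (j + 1) + k < s.length := by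
      have := List.length_drop (l := s) (i := j + 1); omega
    have hcg : s[(j + 1) + k]? = some c := by
      rw [List.getElem?_eq_getElem hklen, ← List.getElem_drop (h := by omega)]
      exact congrArg some hck
    have hex : ∃ m, j + 1 ≤ m ∧ s[m]? = some c := ⟨(j + 1) + k, by omega, hcg⟩
    obtain ⟨hm1, hm2⟩ := Nat.find_spec hex
    set m := Nat.find hex with hmdef
    have hmlen : m < s.length := List.getElem?_eq_some_iff.mp hm2 |>.choose
    have hmmin : ∀ i, j + 1 ≤ i → i < m → s[i]? ≠ some c := by
      intro i hi1 hi2 hic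
      exact Nat.find_min hex hi2 ⟨hi1, hic⟩
    have e1 : PySem.Chars.findFrom s [c] (j : Int) none = (m : Int) := by
      refine pv_findFrom_eq_iff s c j m (by omega) hmlen (by omega) hm2 ?_
      intro i hij him hic
      rcases Nat.eq_or_lt_of_le hij with h | h
      · exact hc (h ▸ hic)
      · exact hmmin i h him hic
    have e2 : PySem.Chars.findFrom s [c] ((j : Int) + 1) none = (m : Int) := by
      have : ((j : Int) + 1) = ((j + 1 : Nat) : Int) := by push_cast; ring
      rw [this]
      exact pv_findFrom_eq_iff s c (j + 1) m (by omega) hmlen hm1 hm2 hmmin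
    rw [e1, e2]
  · have h1 : PySem.Chars.findFrom s [c] (j : Int) none = -1 := by
      rw [pv_findFrom_neg_iff s j c (by omega), hdrop]
      intro h
      rcases List.mem_cons.mp h with h | h
      · exact hc (by rw [List.getElem?_eq_getElem hj, h])
      · exact hmem h
    have h2 : PySem.Chars.findFrom s [c] ((j : Int) + 1) none = -1 := by
      have := (pv_findFrom_neg_iff s (j + 1) c (by omega)).mpr hmem
      exact_mod_cast this
    rw [h1, h2]

lemma pv_closeIdx_depth_zero (s : List Char) (fuel : Nat) (d : Int) (i : Int) (hd : ¬ 0 < d) :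
    pvCloseIdx s fuel d i = i - 1 := by
  cases fuel with
  | zero => rfl
  | succ f => simp only [pvCloseIdx, if_neg hd]

lemma pv_scan_base (s : List Char) (j : Nat) (fuel : Nat) (d : Int) (hj : j = s.length)
    (hf : 0 < fuel) (hd : 0 < d) :
    pvScanA s d (PySem.List.pyRange (j : Int) (s.length : Int) 1) ((j : Int) - 1) =
      pvCloseIdx s fuel d (j : Int) := by
  obtain ⟨f, rfl⟩ : ∃ f, fuel = f + 1 := ⟨fuel - 1, by omega⟩
  have hnil : PySem.List.pyRange (j : Int) (s.length : Int) 1 = [] :=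
    PySem.List.pyRange_one_eq_nil (by omega)
  have hno : PySem.Chars.findFrom s ['{'] (j : Int) none = -1 :=
    (pv_findFrom_neg_iff s j '{' (by omega)).mpr (by subst hj; simp)
  have hnc : PySem.Chars.findFrom s ['}'] (j : Int) none = -1 :=
    (pv_findFrom_neg_iff s j '}' (by omega)).mpr (by subst hj; simp)
  rw [hnil]
  simp only [pvScanA, pvCloseIdx, if_pos hd, hno, hnc]
  norm_num
  omega

-- B's jump scan ignores the character at a non-brace position
lemma pv_closeIdx_skip (s : List Char) (fuel : Nat) (d : Int) (j : Nat) (hd : 0 < d)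
    (hj : j < s.length) (h1 : s[j]? ≠ some '{') (h2 : s[j]? ≠ some '}') :
    pvCloseIdx s (fuel + 1) d (j : Int) = pvCloseIdx s (fuel + 1) d ((j : Int) + 1) := by
  have h1' := pv_findFrom_succ_of_ne s j '{' hj h1
  have h2' := pv_findFrom_succ_of_ne s j '}' hj h2
  simp only [pvCloseIdx, if_pos hd, h1', h2']

-- the two bracket scans agree
lemma pv_scan_eq (s : List Char) : ∀ (n j : Nat) (d : Int) (fuel : Nat),
    s.length ≤ j + n → j ≤ s.length → 0 < d → s.length < fuel + j →
    pvScanA s d (PySem.List.pyRange (j : Int) (s.length : Int) 1) ((j : Int) - 1) =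
      pvCloseIdx s fuel d (j : Int) := by
  intro n
  induction n with
  | zero =>
    intro j d fuel hn hj hd hf
    exact pv_scan_base s j fuel d (by omega) (by omega) hd
  | succ n ih =>
    intro j d fuel hn hj hd hf
    by_cases hjl : j = s.length
    · exact pv_scan_base s j fuel d hjl (by omega) hd
    · have hjlt : j < s.length := by omega
      obtain ⟨f, rfl⟩ : ∃ f, fuel = f + 1 := ⟨fuel - 1, by omega⟩
      have hjg : PySem.List.pyGet? s (j : Int) = some s[j] := by
        rw [PySem.List.pyGet?_natCast, List.getElem?_eq_getElem hjlt]
      have hcons : PySem.List.pyRange (j : Int) (s.length : Int) 1 =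
          (j : Int) :: PySem.List.pyRange ((j : Int) + 1) (s.length : Int) 1 :=
        PySem.List.pyRange_one_cons (by exact_mod_cast hjlt)
      have hcast : ((j : Int) + 1) = ((j + 1 : Nat) : Int) := by push_cast; ring
      have hlast : ((j + 1 : Nat) : Int) - 1 = (j : Int) := by push_cast; ring
      by_cases hopen : s[j] = '{'
      · -- '{' : A pushes the level, B jumps to this very brace
        have hno : PySem.Chars.findFrom s ['{'] (j : Int) none = (j : Int) :=
          pv_findFrom_self s j '{' hjlt (by rw [List.getElem?_eq_getElem hjlt, hopen])
        have hnc : PySem.Chars.findFrom s ['}'] (j : Int) none =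
            PySem.Chars.findFrom s ['}'] ((j : Int) + 1) none :=
          pv_findFrom_succ_of_ne s j '}' hjlt
            (by rw [List.getElem?_eq_getElem hjlt, hopen]; simp)
        have hA : pvScanA s d (PySem.List.pyRange (j : Int) (s.length : Int) 1) ((j : Int) - 1) =
            pvScanA s (d + 1) (PySem.List.pyRange ((j : Int) + 1) (s.length : Int) 1) (j : Int) := by
          rw [hcons]
          simp only [pvScanA, hjg, hopen, if_true]
          rw [if_neg (by omega)]
        have hcond : PySem.Chars.findFrom s ['}'] ((j : Int) + 1) none = -1 ∨
            ((j : Int) ≠ -1 ∧ (j : Int) < PySem.Chars.findFrom s ['}'] ((j : Int) + 1) none) := by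
          by_cases hc1 : PySem.Chars.findFrom s ['}'] ((j : Int) + 1) none = -1
          · exact Or.inl hc1
          · refine Or.inr ⟨by omega, ?_⟩
            have := (PySem.Chars.findFrom_natCast_spec s ['}'] (j + 1) (by omega)
              (by rw [← hcast]; exact hc1)).1
            rw [← hcast] at this; omega
        have hB : pvCloseIdx s (f + 1) d (j : Int) =
            pvCloseIdx s f (d + 1) ((j : Int) + 1) := by
          simp only [pvCloseIdx, if_pos hd, hno, hnc]
          rw [if_neg (by omega), if_pos hcond]
        rw [hA, hB, hcast, ← hlast]
        exact ih (j + 1) (d + 1) f (by omega) (by omega) (by omega) (by omega)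
      · by_cases hclose : s[j] = '}'
        · -- '}' : A drops the level, B jumps to this very brace
          have hnc : PySem.Chars.findFrom s ['}'] (j : Int) none = (j : Int) :=
            pv_findFrom_self s j '}' hjlt (by rw [List.getElem?_eq_getElem hjlt, hclose])
          have hno : PySem.Chars.findFrom s ['{'] (j : Int) none =
              PySem.Chars.findFrom s ['{'] ((j : Int) + 1) none :=
            pv_findFrom_succ_of_ne s j '{' hjlt
              (by rw [List.getElem?_eq_getElem hjlt, hclose]; simp)
          have hnogt : PySem.Chars.findFrom s ['{'] ((j : Int) + 1) none ≠ -1 →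
              (j : Int) < PySem.Chars.findFrom s ['{'] ((j : Int) + 1) none := by
            intro h
            have := (PySem.Chars.findFrom_natCast_spec s ['{'] (j + 1) (by omega)
              (by rw [← hcast]; exact h)).1
            rw [← hcast] at this; omega
          have hB : pvCloseIdx s (f + 1) d (j : Int) =
              pvCloseIdx s f (d - 1) ((j : Int) + 1) := by
            simp only [pvCloseIdx, if_pos hd, hno, hnc]
            rw [if_neg (by omega), if_neg]
            rintro (h | ⟨hne, hlt⟩)
            · omega
            · exact absurd (hnogt hne) (by omega)
          have hA : pvScanA s d (PySem.List.pyRange (j : Int) (s.length : Int) 1) ((j : Int) - 1) =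
              if d - 1 = 0 then (j : Int)
              else pvScanA s (d - 1) (PySem.List.pyRange ((j : Int) + 1) (s.length : Int) 1) (j : Int) := by
            rw [hcons]
            simp only [pvScanA, hjg, hclose,
              show (some '}' = some '{') = False by simp, if_false, if_true]
          rw [hA, hB]
          by_cases hd1 : d - 1 = 0
          · rw [if_pos hd1, pv_closeIdx_depth_zero s f (d - 1) ((j : Int) + 1) (by omega)]
            omega
          · rw [if_neg hd1, hcast, ← hlast]
            exact ih (j + 1) (d - 1) f (by omega) (by omega) (by omega) (by omega)
        · -- neither brace: A steps over it, B's finds do not see it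
          have hA : pvScanA s d (PySem.List.pyRange (j : Int) (s.length : Int) 1) ((j : Int) - 1) =
              pvScanA s d (PySem.List.pyRange ((j : Int) + 1) (s.length : Int) 1) (j : Int) := by
            rw [hcons]
            simp only [pvScanA, hjg,
              show (some s[j] = some '{') = False by simp [hopen],
              show (some s[j] = some '}') = False by simp [hclose], if_false]
            rw [if_neg (by omega)]
          have hB := pv_closeIdx_skip s f d j hd hjlt
            (by rw [List.getElem?_eq_getElem hjlt]; simp [hopen])
            (by rw [List.getElem?_eq_getElem hjlt]; simp [hclose])
          rw [hA, hB, hcast, ← hlast]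
          exact ih (j + 1) d (f + 1) (by omega) (by omega) hd (by omega)

-- the rewrite bodies agree when the found macro has a '{' after it
lemma pv_body_eq (s t : List Char) (ht : t ∈ pvTypes) (hI : pvInv s)
    (hp : 0 ≤ PySem.Chars.find s ('\\' :: t)) :
    (let p := PySem.Chars.find s ('\\' :: t)
     let o := PySem.Chars.findFrom s ['{'] p none
     let idx := pvScanA s 0 (PySem.List.pyRange o (s.length : Int) 1) ((s.length : Int) - 1)
     some (PySem.List.slice s none (some p) ++ pvBegin t ++
           PySem.List.slice s (some (o + 1)) (some idx) ++ pvEnd t ++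
           PySem.List.slice s (some (idx + 1)) none)) =
    (let o := PySem.Chars.findFrom s ['{'] (PySem.Chars.find s ('\\' :: t)) none
     if o < 0 then none
     else
       let c := pvCloseIdx s (s.length + 1) 1 (o + 1)
       some (PySem.List.slice s none (some (PySem.Chars.find s ('\\' :: t))) ++ pvBegin t ++
             PySem.List.slice s (some (o + 1)) (some c) ++ pvEnd t ++
             PySem.List.slice s (some (c + 1)) none) : Option (List Char)) := by
  set p := PySem.Chars.find s ('\\' :: t) with hpd
  have hplen : p.toNat ≤ s.length := by
    have := PySem.Chars.find_le_length s ('\\' :: t)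
    omega
  have hppre : ('\\' :: t) <+: s.drop p.toNat := (PySem.Chars.find_spec hp).1
  have hbrace : '{' ∈ s.drop p.toNat := hI p.toNat t ht hppre
  have hpc : ((p.toNat : Nat) : Int) = p := by omega
  have honeg : PySem.Chars.findFrom s ['{'] p none ≠ -1 := by
    intro h
    rw [← hpc, pv_findFrom_neg_iff s p.toNat '{' hplen] at h
    exact h hbrace
  obtain ⟨hole, hopre, -⟩ := PySem.Chars.findFrom_natCast_spec s ['{'] p.toNat hplen
    (by rwa [hpc])
  rw [hpc] at hole hopre
  set o := PySem.Chars.findFrom s ['{'] p none with hod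
  have ho0 : 0 ≤ o := le_trans (by omega) hole
  have hoc : s[o.toNat]? = some '{' := (pv_singleton_prefix_iff s o.toNat '{').mp hopre
  have holen : o.toNat < s.length := List.getElem?_eq_some_iff.mp hoc |>.choose
  have hocast : ((o.toNat : Nat) : Int) = o := by omega
  -- A's scan enters at the '{' with level 1
  have hAstep : pvScanA s 0 (PySem.List.pyRange o (s.length : Int) 1) ((s.length : Int) - 1) =
      pvScanA s 1 (PySem.List.pyRange (o + 1) (s.length : Int) 1) o := by
    rw [← hocast, PySem.List.pyRange_one_cons (by exact_mod_cast holen)]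
    have hg : PySem.List.pyGet? s ((o.toNat : Nat) : Int) = some '{' := by
      rw [PySem.List.pyGet?_natCast]; exact hoc
    simp only [pvScanA, hg, if_true]
    rw [if_neg (by omega)]
    norm_num
  have hscan : pvScanA s 1 (PySem.List.pyRange (o + 1) (s.length : Int) 1) o =
      pvCloseIdx s (s.length + 1) 1 (o + 1) := by
    have h := pv_scan_eq s s.length (o.toNat + 1) 1 (s.length + 1) (by omega) (by omega)
      (by omega) (by omega)
    rw [show ((o.toNat + 1 : Nat) : Int) = o + 1 by omega] at h
    rw [show (o + 1) - 1 = o by ring] at h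
    exact h
  simp only []
  rw [if_neg (by omega), hAstep, hscan]

lemma pv_pass_gen (s : List Char) (hI : pvInv s) : ∀ ts, (∀ t ∈ ts, t ∈ pvTypes) →
    pvPassA s ts =
      (match (ts.map (fun t => (t, PySem.Chars.find s ('\\' :: t)))).find?
          (fun x => decide (0 ≤ x.2)) with
      | none => none
      | some (t, p) =>
        let o := PySem.Chars.findFrom s ['{'] p none
        if o < 0 then none
        else
          let c := pvCloseIdx s (s.length + 1) 1 (o + 1)
          some (PySem.List.slice s none (some p) ++ pvBegin t ++
                PySem.List.slice s (some (o + 1)) (some c) ++ pvEnd t ++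
                PySem.List.slice s (some (c + 1)) none)) := by
  intro ts
  induction ts with
  | nil => intro _; rfl
  | cons t ts ih =>
    intro hmem
    by_cases hp : 0 ≤ PySem.Chars.find s ('\\' :: t)
    · rw [List.map_cons, List.find?_cons_of_pos (by simpa using hp)]
      simp only [pvPassA]
      rw [if_pos hp]
      exact pv_body_eq s t (hmem t (by simp)) hI hp
    · rw [List.map_cons, List.find?_cons_of_neg (by simpa using hp)]
      simp only [pvPassA]
      rw [if_neg hp]
      exact ih (fun u hu => hmem u (by simp [hu]))

lemma pv_pass_eq (s : List Char) (hI : pvInv s) : pvPassA s pvTypes = pvStepB s := by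
  rw [pv_pass_gen s hI pvTypes (fun _ h => h)]
  rfl

-- one rewrite preserves the invariant: everything before the inserted \end{...} has
-- its '{' right there, and everything after is an untouched suffix of the old string
lemma pv_inv_preserved (s Q t : List Char) (k : Nat) (ht : t ∈ pvTypes) (hI : pvInv s) :
    pvInv (Q ++ (pvEnd t ++ s.drop k)) := by
  intro q t' ht' hpre
  set E := pvEnd t with hE
  set R := s.drop k with hR
  set s' := Q ++ (E ++ R) with hs'
  have hE6 : (" \\end{".toList).length = 6 := by decide
  have hEdrop : E.drop 6 = t ++ "} ".toList := by
    rw [hE]; unfold pvEnd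
    rw [List.append_assoc, ← hE6, List.drop_left]
  have hElen : 8 ≤ E.length := by
    rw [hE]; unfold pvEnd; simp
  have hE5 : E[5]? = some '{' := by
    rw [hE]; unfold pvEnd
    rw [List.append_assoc, List.getElem?_append_left (by rw [hE6]; omega)]
    decide
  have hKlt : Q.length + 5 < s'.length := by
    rw [hs']; simp; omega
  have hK : s'[Q.length + 5]? = some '{' := by
    rw [hs', List.getElem?_append_right (by omega)]
    rw [show Q.length + 5 - Q.length = 5 by omega]
    rw [List.getElem?_append_left (by omega)]
    exact hE5
  by_cases hq : q ≤ Q.length + 5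
  · -- the '{' of the inserted \end{...} lies at or after q
    obtain ⟨hlt, hget⟩ := List.getElem?_eq_some_iff.mp hK
    rw [← hget]
    exact pv_getElem_mem_drop s' q (Q.length + 5) hlt hq
  · -- q starts at '\\', which cannot sit inside "…{type} ": q is in the old suffix
    have hhead : s'[q]? = some '\\' := by
      have : ['\\'] <+: s'.drop q := List.IsPrefix.trans ⟨t', rfl⟩ hpre
      exact (pv_singleton_prefix_iff s' q '\\').mp this
    have hqS : Q.length + E.length ≤ q := by
      by_contra hqS
      rw [not_le] at hqS
      have h1 : s'[q]? = E[q - Q.length]? := by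
        rw [hs', List.getElem?_append_right (by omega), List.getElem?_append_left (by omega)]
      have h2 : E[q - Q.length]? = (E.drop 6)[q - Q.length - 6]? := by
        rw [List.getElem?_drop]
        congr 1
        omega
      have hmem : '\\' ∈ t ++ "} ".toList := by
        have h3 : (t ++ "} ".toList)[q - Q.length - 6]? = some '\\' := by
          rw [← hEdrop, ← h2, ← h1, hhead]
        exact List.mem_of_getElem? h3
      have hnoBS : ∀ u ∈ pvTypes, '\\' ∉ u := by decide
      rcases List.mem_append.mp hmem with h | h
      · exact hnoBS t ht h
      · simp at h
    -- map the occurrence back into s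
    set r := q - (Q.length + E.length) with hrdef
    have hq2 : q = (Q ++ E).length + r := by simp [hrdef]; omega
    have hdropeq : s'.drop q = s.drop (r + k) := by
      rw [hs', ← List.append_assoc, hq2, List.drop_append, hR, List.drop_drop]
      rw [List.drop_eq_nil_of_le (by omega), List.nil_append]
      congr 1
      omega
    rw [hdropeq] at hpre ⊢
    exact hI _ t' ht' hpre

lemma pv_stepB_shape (s s' : List Char) (h : pvStepB s = some s') :
    ∃ Q t k, t ∈ pvTypes ∧ s' = Q ++ (pvEnd t ++ s.drop k) := by
  unfold pvStepB at h
  rcases hfind : (pvTypes.map (fun t => (t, PySem.Chars.find s ('\\' :: t)))).find?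
      (fun x => decide (0 ≤ x.2)) with _ | ⟨t, p⟩
  · rw [hfind] at h; simp at h
  · rw [hfind] at h
    simp only at h
    split at h
    · simp at h
    · have ht : t ∈ pvTypes := by
        have := List.mem_of_find?_eq_some hfind
        obtain ⟨u, hu, he⟩ := List.mem_map.mp this
        obtain ⟨rfl, -⟩ := Prod.mk.injEq .. ▸ he
        exact hu
      obtain rfl := Option.some.injEq .. ▸ h
      refine ⟨PySem.List.slice s none (some p) ++ pvBegin t ++
        PySem.List.slice s (some (PySem.Chars.findFrom s ['{'] p none + 1))
          (some (pvCloseIdx s (s.length + 1) 1 (PySem.Chars.findFrom s ['{'] p none + 1))),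
        t, PySem.List.clampIdx s.length
          (pvCloseIdx s (s.length + 1) 1 (PySem.Chars.findFrom s ['{'] p none + 1) + 1),
        ht, ?_⟩
      rw [PySem.List.slice_some_none]
      simp [List.append_assoc]

lemma pv_loop_eq : ∀ (n : Nat) (s : List Char), pvInv s → pvLoopA n s = pvLoopB n s := by
  intro n
  induction n with
  | zero => intro s _; rfl
  | succ n ih =>
    intro s hI
    simp only [pvLoopA, pvLoopB, pv_pass_eq s hI]
    rcases hstep : pvStepB s with _ | s'
    · rfl
    · obtain ⟨Q, t, k, ht, rfl⟩ := pv_stepB_shape s s' hstep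
      exact ih _ (pv_inv_preserved s Q t k ht hI)

-- ===== VERDICT (by name: the statement is the Claim_ definition above) =====
theorem fix_matrix_spec : Claim_equal_fix_matrix := by
  intro s _hDom hPre
  unfold Spec_fix_matrix fix_matrix fix_matrix_alt
  exact congrArg String.ofList (pv_loop_eq _ _ (pvInv_of_pre s hPre))
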